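-- pv_equiv track=rewrite | github.com/HuangWeiKulish/E-commerce-SKU-Categorization | Python Code/SKUFunctions.py | Space_L_D
-- ===== SOURCE A (Python) =====
-- def Space_L_D(Str):
--     Str2=''
--     j=0
--     for i in range(0,len(Str)-1):
--         if Str[i].isdigit() != Str[i+1].isdigit():
--             Str2 = Str2+" "+Str[j:i+1]
--             j=i+1
--     Str2=Str2+" "+Str[j:len(Str)]
--     return Str2.strip()
-- ===== SOURCE B (Python) =====
-- from itertools import groupby
--
-- def Space_L_D(Str):
--     runs = [''.join(g) for _, g in groupby(Str, key=str.isdigit)]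
--     return ' '.join(runs).strip()
-- ===== Notes on version B (the rewrite author's own statement) =====
-- stated objective: simpler
-- what changed: Replaces A's index-tracking boundary scan with slice bookkeeping by an itertools.groupby run decomposition followed by a single space-join and strip.
import Mathlib
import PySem

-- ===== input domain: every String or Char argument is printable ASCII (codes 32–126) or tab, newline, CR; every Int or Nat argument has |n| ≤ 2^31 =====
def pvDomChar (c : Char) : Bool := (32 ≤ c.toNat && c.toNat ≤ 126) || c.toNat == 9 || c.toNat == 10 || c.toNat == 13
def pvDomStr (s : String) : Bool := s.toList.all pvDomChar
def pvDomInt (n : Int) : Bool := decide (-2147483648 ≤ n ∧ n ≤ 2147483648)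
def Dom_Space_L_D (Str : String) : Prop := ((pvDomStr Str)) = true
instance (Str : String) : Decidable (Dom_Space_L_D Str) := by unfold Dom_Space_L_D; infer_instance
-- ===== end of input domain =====

-- B replaces A's index-tracking boundary scan by a run decomposition (groupby on isdigit) joined with ' ' and stripped; return values agree on all strings.

-- ===== PORT A =====
-- A's loop body: at a digit/non-digit boundary append " " + Str[j:i+1] and move j to i+1.
def pvStepA (cs : List Char) (st : List Char × Int) (i : Int) : List Char × Int :=
  if PySem.Chars.isdigit (PySem.List.pyGetD cs i ' ')
      ≠ PySem.Chars.isdigit (PySem.List.pyGetD cs (i + 1) ' ') then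
    (st.1 ++ ' ' :: PySem.List.slice cs (some st.2) (some (i + 1)), i + 1)
  else st

def Space_L_D (Str : String) : String :=
  let cs := Str.toList
  let st := (PySem.List.pyRange 0 ((cs.length : Int) - 1) 1).foldl (pvStepA cs) ([], 0)
  String.ofList (PySem.Chars.strip
    (st.1 ++ ' ' :: PySem.List.slice cs (some st.2) (some (cs.length : Int))))

-- ===== PORT B =====
-- itertools.groupby(Str, key=str.isdigit): the list of maximal runs of equal digit-ness.
def pvRuns : List Char → List (List Char)
  | [] => []
  | c :: cs =>
    (c :: cs.takeWhile (fun d => PySem.Chars.isdigit d == PySem.Chars.isdigit c))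
      :: pvRuns (cs.dropWhile (fun d => PySem.Chars.isdigit d == PySem.Chars.isdigit c))
termination_by l => l.length
decreasing_by
  exact Nat.lt_succ_of_le (List.length_dropWhile_le _ _)

def Space_L_D_alt (Str : String) : String :=
  String.ofList (PySem.Chars.strip (PySem.Chars.join [' '] (pvRuns Str.toList)))

-- ===== PRECONDITION & SPEC =====
def Spec_Space_L_D (Str : String) (out : String) : Prop := out = Space_L_D_alt Str
instance (Str : String) (out : String) : Decidable (Spec_Space_L_D Str out) := by unfold Spec_Space_L_D; infer_instance

-- ===== CLAIM (what is proved, stated in full; the proofs are below) =====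
def Claim_equal_Space_L_D : Prop := ∀ (Str : String), Dom_Space_L_D Str → Spec_Space_L_D Str (Space_L_D Str)

-- ===== LEMMAS AND PROOFS =====

-- join with a single-space separator is the head run followed by " "+run for each later run
theorem pv_join_space (r : List Char) (rs : List (List Char)) :
    PySem.Chars.join [' '] (r :: rs) = r ++ rs.flatMap (fun t => ' ' :: t) := by
  induction rs generalizing r with
  | nil => simp [PySem.Chars.join_singleton]
  | cons q qs ih =>
      rw [PySem.Chars.join_cons_cons, ih]
      simp

theorem pv_strip_space_cons (x : List Char) :
    PySem.Chars.strip (' ' :: x) = PySem.Chars.strip x := by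
  simp [PySem.Chars.strip, PySem.Chars.lstrip,
    show PySem.Chars.isspace ' ' = true from by decide]

-- pvRuns on a list whose first two elements have equal digit-ness: the head run extends
theorem pv_runs_cons_eq (c d : Char) (t : List Char)
    (h : PySem.Chars.isdigit c = PySem.Chars.isdigit d) :
    pvRuns (c :: d :: t)
      = (c :: (pvRuns (d :: t)).headI) :: (pvRuns (d :: t)).tail := by
  have hp : (fun x => PySem.Chars.isdigit x == PySem.Chars.isdigit c)
      = (fun x => PySem.Chars.isdigit x == PySem.Chars.isdigit d) := by
    funext x; rw [h]
  rw [pvRuns, pvRuns]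
  simp [h.symm, hp]

-- … whose first two elements differ in digit-ness: the head run is the singleton [c]
theorem pv_runs_cons_ne (c d : Char) (t : List Char)
    (h : PySem.Chars.isdigit c ≠ PySem.Chars.isdigit d) :
    pvRuns (c :: d :: t) = [c] :: pvRuns (d :: t) := by
  have hd : (PySem.Chars.isdigit d == PySem.Chars.isdigit c) = false := by
    simp [Ne.symm h]
  rw [pvRuns]
  simp [hd]

-- take one more character of the suffix starting at j (j ≤ k < cs.length)
theorem pv_take_snoc (cs : List Char) (j k : Nat) (hjk : j ≤ k) (hk : k < cs.length) :
    (cs.drop j).take (k + 1 - j) = (cs.drop j).take (k - j) ++ [cs[k]] := by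
  have hlen : k - j < (cs.drop j).length := by
    rw [List.length_drop]; omega
  have hget : (cs.drop j)[k - j] = cs[k] := by
    rw [List.getElem_drop]
    congr 1; omega
  have : k + 1 - j = (k - j) + 1 := by omega
  rw [this, List.take_add_one, List.getElem?_eq_getElem hlen, hget]
  rfl

-- the core invariant: the remaining loop (indices k..cs.length-2, current run starting at j)
-- followed by the final " " + Str[j':len] append produces acc, then " " + (pending ++ head run),
-- then " " + run for every later run
theorem pv_loop_runs (cs : List Char) :
    ∀ (m k j : Nat) (acc r : List Char) (rs : List (List Char)),
      j ≤ k → k + m + 1 = cs.length → pvRuns (cs.drop k) = r :: rs →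
      (let st := ((List.range' k m).map (fun (i : Nat) => (i : Int))).foldl (pvStepA cs) (acc, (j : Int))
       st.1 ++ ' ' :: PySem.List.slice cs (some st.2) (some (cs.length : Int)))
        = acc ++ ' ' :: ((cs.drop j).take (k - j) ++ r) ++ rs.flatMap (fun t => ' ' :: t) := by
  intro m
  induction m with
  | zero =>
      intro k j acc r rs hjk hlen hruns
      have hk : k < cs.length := by omega
      have hdropk : cs.drop k = [cs[k]] := by
        rw [List.drop_eq_getElem_cons hk]
        have : cs.drop (k + 1) = [] := by
          apply List.drop_eq_nil_of_le; omega
        rw [this]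
      rw [hdropk, pvRuns] at hruns
      simp only [List.takeWhile_nil, List.dropWhile_nil, pvRuns] at hruns
      obtain ⟨hr, hrs⟩ := List.cons.inj hruns
      subst hrs
      simp only [List.range'_zero, List.map_nil, List.foldl_nil]
      have hslice : PySem.List.slice cs (some (j : Int)) (some (cs.length : Int))
          = cs.drop j := by
        rw [PySem.List.slice_natCast]
        apply List.take_of_length_le
        rw [List.length_drop]
      have hsplit : cs.drop j = (cs.drop j).take (k - j) ++ [cs[k]] := by
        have h1 := List.take_append_drop (k - j) (cs.drop j)
        have h2 : (cs.drop j).drop (k - j) = cs.drop k := by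
          rw [List.drop_drop]; congr 1; omega
        rw [h2, hdropk] at h1
        exact h1.symm
      rw [hslice]
      simp only [← hr, List.flatMap_nil, List.append_nil]
      rw [← hsplit]
  | succ m ih =>
      intro k j acc r rs hjk hlen hruns
      have hk : k < cs.length := by omega
      have hk1 : k + 1 < cs.length := by omega
      have hdropk : cs.drop k = cs[k] :: cs.drop (k + 1) := List.drop_eq_getElem_cons hk
      have hdropk1 : cs.drop (k + 1) = cs[k + 1] :: cs.drop (k + 2) :=
        List.drop_eq_getElem_cons hk1
      have hrange : List.range' k (m + 1) = k :: List.range' (k + 1) m := by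
        rw [List.range'_succ]
      obtain ⟨r', rs', hruns'⟩ :
          ∃ r' rs', pvRuns (cs.drop (k + 1)) = r' :: rs' := by
        rw [hdropk1]
        exact ⟨_, _, by rw [pvRuns]⟩
      have hgk : PySem.List.pyGetD cs ((k : Int)) ' ' = cs[k] := by
        rw [PySem.List.pyGetD_natCast, List.getD_eq_getElem?_getD,
          List.getElem?_eq_getElem hk]; rfl
      have hgk1 : PySem.List.pyGetD cs ((k : Int) + 1) ' ' = cs[k + 1] := by
        have : (k : Int) + 1 = ((k + 1 : Nat) : Int) := by push_cast; ring
        rw [this, PySem.List.pyGetD_natCast, List.getD_eq_getElem?_getD,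
          List.getElem?_eq_getElem hk1]; rfl
      simp only [hrange, List.map_cons, List.foldl_cons]
      by_cases hb : PySem.Chars.isdigit cs[k] = PySem.Chars.isdigit cs[k + 1]
      · -- no boundary between k and k+1: state unchanged, head run extends
        have hstep : pvStepA cs (acc, (j : Int)) (k : Int) = (acc, (j : Int)) := by
          rw [pvStepA]; simp [hgk, hgk1, hb]
        have hruns2 : pvRuns (cs.drop k) = (cs[k] :: r') :: rs' := by
          rw [hdropk, hdropk1] at *
          rw [pv_runs_cons_eq _ _ _ hb, ← hdropk1, hruns']
          simp
        rw [hruns2] at hruns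
        obtain ⟨hr, hrs⟩ := List.cons.inj hruns
        subst hrs
        rw [hstep]
        have := ih (k + 1) j acc r' rs' (by omega) (by omega) hruns'
        simp only at this
        rw [this, pv_take_snoc cs j k hjk hk, ← hr]
        simp
      · -- boundary: emit " " + Str[j:k+1], run restarts at k+1
        have hstep : pvStepA cs (acc, (j : Int)) (k : Int)
            = (acc ++ ' ' :: PySem.List.slice cs (some (j : Int)) (some ((k : Int) + 1)),
               (k : Int) + 1) := by
          rw [pvStepA]; simp [hgk, hgk1, hb]
        have hruns2 : pvRuns (cs.drop k) = [cs[k]] :: (r' :: rs') := by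
          rw [hdropk, hdropk1] at *
          rw [pv_runs_cons_ne _ _ _ hb, ← hdropk1, hruns']
        rw [hruns2] at hruns
        obtain ⟨hr, hrs⟩ := List.cons.inj hruns
        have hcast : (k : Int) + 1 = ((k + 1 : Nat) : Int) := by push_cast; ring
        have hsl : PySem.List.slice cs (some (j : Int)) (some ((k : Int) + 1))
            = (cs.drop j).take (k + 1 - j) := by
          rw [hcast, PySem.List.slice_natCast]
        rw [hstep, hsl, hcast]
        have := ih (k + 1) (k + 1)
          (acc ++ ' ' :: (cs.drop j).take (k + 1 - j)) r' rs' (by omega) (by omega) hruns'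
        simp only at this
        rw [this, pv_take_snoc cs j k hjk hk, ← hr, ← hrs]
        simp

theorem pv_list_eq (cs : List Char) :
    PySem.Chars.strip
        ((let st := (PySem.List.pyRange 0 ((cs.length : Int) - 1) 1).foldl (pvStepA cs) ([], 0)
          st.1 ++ ' ' :: PySem.List.slice cs (some st.2) (some (cs.length : Int))))
      = PySem.Chars.strip (PySem.Chars.join [' '] (pvRuns cs)) := by
  cases cs with
  | nil =>
      rw [show pvRuns [] = [] from by rw [pvRuns]]
      decide
  | cons c t =>
      have hlen : ((c :: t).length : Int) - 1 = (((c :: t).length - 1 : Nat) : Int) := by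
        simp
      obtain ⟨r, rs, hruns⟩ : ∃ r rs, pvRuns (c :: t) = r :: rs :=
        ⟨_, _, by rw [pvRuns]⟩
      have hrange : PySem.List.pyRange 0 (((c :: t).length : Int) - 1) 1
          = (List.range' 0 ((c :: t).length - 1)).map (fun (i : Nat) => (i : Int)) := by
        rw [hlen, PySem.List.pyRange_zero_natCast, List.range_eq_range']
      have hmain := pv_loop_runs (c :: t) ((c :: t).length - 1) 0 0 [] r rs
        (by omega) (by simp) (by simpa using hruns)
      simp only at hmain
      rw [hrange]
      have h0 : ((0 : Nat) : Int) = (0 : Int) := by norm_num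
      rw [← h0, hmain, hruns, pv_join_space]
      simp only [List.drop_zero, Nat.zero_sub, List.take_zero, List.nil_append]
      exact pv_strip_space_cons _

-- ===== VERDICT (by name: the statement is the Claim_ definition above) =====
theorem Space_L_D_spec : Claim_equal_Space_L_D := by
  intro Str _
  unfold Spec_Space_L_D Space_L_D Space_L_D_alt
  simp only
  rw [pv_list_eq]
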